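-- pv_equiv track=rewrite | github.com/deaconsham/badminton-skill-based-matchmaking | engine.py | _all_team_splits
-- ===== SOURCE A (Python) =====
-- import itertools
--
-- def _all_team_splits(lobby):
--     indices = [0, 1, 2, 3]
--     seen = set()
--     for pair in itertools.combinations(indices, 2):
--         complement = tuple(i for i in indices if i not in pair)
--         key = frozenset([pair, complement])
--         if key not in seen:
--             seen.add(key)
--             yield [lobby[pair[0]], lobby[pair[1]]], [lobby[complement[0]], lobby[complement[1]]]
-- ===== SOURCE B (Python) =====
-- def _all_team_splits(lobby):
--     # Simpler: player 0 is always on team one; pick their partner j, team two is the rest ascending.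
--     for j in (1, 2, 3):
--         rest = [i for i in (1, 2, 3) if i != j]
--         yield [lobby[0], lobby[j]], [lobby[rest[0]], lobby[rest[1]]]
-- ===== Notes on version B (the rewrite author's own statement) =====
-- stated objective: simpler
-- what changed: Replaced the combinations(4,2) enumeration with seen/frozenset deduplication by a single loop over player 0's partner, taking the two remaining indices ascending as team two.
import Mathlib
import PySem

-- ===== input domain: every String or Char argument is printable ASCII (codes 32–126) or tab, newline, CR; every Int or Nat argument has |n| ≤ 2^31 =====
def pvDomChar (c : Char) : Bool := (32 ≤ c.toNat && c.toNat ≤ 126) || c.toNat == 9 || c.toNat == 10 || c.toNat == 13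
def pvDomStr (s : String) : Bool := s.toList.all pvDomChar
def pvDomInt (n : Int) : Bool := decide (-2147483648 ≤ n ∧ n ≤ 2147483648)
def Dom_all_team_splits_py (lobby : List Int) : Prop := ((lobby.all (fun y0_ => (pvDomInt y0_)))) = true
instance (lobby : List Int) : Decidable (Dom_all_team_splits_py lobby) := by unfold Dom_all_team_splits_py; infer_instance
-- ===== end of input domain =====

-- B drops the combinations/frozenset dedup: player 0 is always on team one, so one loop over its partner suffices (simpler).


-- ===== PORT A =====
-- itertools.combinations(xs, 2), in Python's order
def pyCombinations2 : List Int → List (Int × Int)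
  | [] => []
  | x :: rest => rest.map (fun y => (x, y)) ++ pyCombinations2 rest

def all_team_splits_py (lobby : List Int) : List (List Int × List Int) :=
  let indices : List Int := [0, 1, 2, 3]
  (((pyCombinations2 indices).foldl (fun (st : List (PySem.Set (Int × Int)) × List (List Int × List Int)) pair =>
      let complement := indices.filter (fun i => !(i == pair.1 || i == pair.2))
      let c0 := complement.getD 0 0
      let c1 := complement.getD 1 0
      let key : PySem.Set (Int × Int) := PySem.Set.ofList [pair, (c0, c1)]
      if st.1.any (fun k => PySem.Set.equal k key) then st
      else (st.1 ++ [key],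
            st.2 ++ [([PySem.List.pyGetD lobby pair.1 0, PySem.List.pyGetD lobby pair.2 0],
                      [PySem.List.pyGetD lobby c0 0, PySem.List.pyGetD lobby c1 0])]))
    ([], []))).2

-- ===== PORT B =====
-- B: player 0 is always on team one; pick the partner j, team two is the rest ascending (simpler).
def all_team_splits_py_alt (lobby : List Int) : List (List Int × List Int) :=
  ([1, 2, 3] : List Int).map (fun j =>
    let rest := ([1, 2, 3] : List Int).filter (fun i => i != j)
    ([PySem.List.pyGetD lobby 0 0, PySem.List.pyGetD lobby j 0],
     [PySem.List.pyGetD lobby (rest.getD 0 0) 0, PySem.List.pyGetD lobby (rest.getD 1 0) 0]))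

-- ===== PRECONDITION & SPEC =====
-- Pre_: Python A (and B) raise IndexError when the lobby has fewer than 4 players.
def Pre_all_team_splits_py (lobby : List Int) : Prop := 4 ≤ lobby.length
instance (lobby : List Int) : Decidable (Pre_all_team_splits_py lobby) := by unfold Pre_all_team_splits_py; infer_instance
def pvWitness_all_team_splits_py : List Int := [1, 2, 3, 4]

def Spec_all_team_splits_py (lobby : List Int) (out : List (List Int × List Int)) : Prop := out = all_team_splits_py_alt lobby
instance (lobby : List Int) (out : List (List Int × List Int)) : Decidable (Spec_all_team_splits_py lobby out) := by unfold Spec_all_team_splits_py; infer_instance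

-- ===== CLAIM (what is proved, stated in full; the proofs are below) =====
def Claim_equal_all_team_splits_py : Prop := ∀ (lobby : List Int), Dom_all_team_splits_py lobby → Pre_all_team_splits_py lobby → Spec_all_team_splits_py lobby (all_team_splits_py lobby)

-- ===== LEMMAS AND PROOFS =====

-- ===== VERDICT (by name: the statement is the Claim_ definition above) =====
theorem all_team_splits_py_spec : Claim_equal_all_team_splits_py := by
  intro lobby _ _
  unfold Spec_all_team_splits_py all_team_splits_py all_team_splits_py_alt pyCombinations2
  rfl
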